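-- pv_equiv track=rewrite | github.com/jessedellariley/fork-it-over | delivery.py | verify_uber_eats_link
-- ===== SOURCE A (Python) =====
-- def verify_uber_eats_link(link, restaurant_name):
--     """Check if a link is the Uber Eats store page for a given restaurant and if so return True."""
--     to_replace = {" ": "-", "&": "%26", "'": "", "#": "%23"}
--     url_restaurant_name = restaurant_name.lower()
--     for key, value in to_replace.items():
--         url_restaurant_name = url_restaurant_name.replace(key, value)
--     if link.startswith(f"https://www.ubereats.com/store/{url_restaurant_name}"):
--         return True
--     return False
-- ===== SOURCE B (Python) =====
-- def verify_uber_eats_link(link, restaurant_name):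
--     """Check if a link is the Uber Eats store page for a given restaurant and if so return True."""
--     to_replace = {" ": "-", "&": "%26", "'": "", "#": "%23"}
--     url = ''.join(to_replace.get(c, c) for c in restaurant_name.lower())
--     return link.startswith(f"https://www.ubereats.com/store/{url}")
-- ===== Notes on version B (the rewrite author's own statement) =====
-- stated objective: alternative
-- what changed: B normalizes the restaurant name in one pass over its characters, expanding each via a per-character dict lookup, instead of A's four sequential whole-string replace passes; the startswith result is returned directly instead of via an if/else.
import Mathlib
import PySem

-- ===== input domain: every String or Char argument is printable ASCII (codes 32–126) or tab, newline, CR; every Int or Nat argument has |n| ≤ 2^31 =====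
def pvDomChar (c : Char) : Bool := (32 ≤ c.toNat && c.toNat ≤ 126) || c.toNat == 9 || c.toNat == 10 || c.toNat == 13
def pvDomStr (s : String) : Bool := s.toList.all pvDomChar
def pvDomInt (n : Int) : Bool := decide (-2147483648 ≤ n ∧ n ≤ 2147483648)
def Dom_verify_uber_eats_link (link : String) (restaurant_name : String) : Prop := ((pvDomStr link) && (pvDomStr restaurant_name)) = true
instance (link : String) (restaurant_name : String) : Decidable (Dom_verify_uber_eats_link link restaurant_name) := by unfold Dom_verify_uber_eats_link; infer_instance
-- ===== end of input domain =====

-- B replaces A's four sequential whole-string replace passes by one per-character pass; same result.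

-- ===== PORT A =====
def verify_uber_eats_link (link : String) (restaurant_name : String) : Bool :=
  let u0 := PySem.Str.lower restaurant_name
  let u1 := PySem.Str.replace u0 " " "-"
  let u2 := PySem.Str.replace u1 "&" "%26"
  let u3 := PySem.Str.replace u2 "'" ""
  let u4 := PySem.Str.replace u3 "#" "%23"
  if PySem.Str.startswith link ("https://www.ubereats.com/store/" ++ u4) then true else false

-- ===== PORT B =====
-- per-character lookup in the replacement dict, defaulting to the character itself
def pvSubst (c : Char) : List Char :=
  if c = ' ' then ['-']
  else if c = '&' then ['%','2','6']
  else if c = '\'' then []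
  else if c = '#' then ['%','2','3']
  else [c]

def verify_uber_eats_link_alt (link : String) (restaurant_name : String) : Bool :=
  let url : List Char := (PySem.Str.lower restaurant_name).toList.flatMap pvSubst
  PySem.Str.startswith link (String.ofList ("https://www.ubereats.com/store/".toList ++ url))

-- ===== PRECONDITION & SPEC =====
def Spec_verify_uber_eats_link (link : String) (restaurant_name : String) (out : Bool) : Prop := out = verify_uber_eats_link_alt link restaurant_name
instance (link : String) (restaurant_name : String) (out : Bool) : Decidable (Spec_verify_uber_eats_link link restaurant_name out) := by unfold Spec_verify_uber_eats_link; infer_instance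

-- ===== CLAIM (what is proved, stated in full; the proofs are below) =====
def Claim_equal_verify_uber_eats_link : Prop := ∀ (link : String) (restaurant_name : String), Dom_verify_uber_eats_link link restaurant_name → Spec_verify_uber_eats_link link restaurant_name (verify_uber_eats_link link restaurant_name)

-- ===== LEMMAS AND PROOFS =====

theorem replace_go_single (k : Char) (v : List Char) :
    ∀ (fuel : Nat) (l acc : List Char), l.length ≤ fuel →
      PySem.Chars.replace.go [k] v fuel l acc
        = acc.reverse ++ l.flatMap (fun c => if c = k then v else [c]) := by
  intro fuel
  induction fuel with
  | zero =>
    intro l acc h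
    have : l = [] := List.length_eq_zero_iff.mp (Nat.le_zero.mp h)
    subst this
    simp [PySem.Chars.replace.go]
  | succ n ih =>
    intro l acc h
    cases l with
    | nil => simp [PySem.Chars.replace.go]
    | cons c t =>
      by_cases hc : c = k
      · subst hc
        have hpre : List.isPrefixOf [c] (c :: t) = true := by
          simp [List.isPrefixOf]
        rw [PySem.Chars.replace.go, if_pos hpre]
        have hd : List.drop [c].length (c :: t) = t := by simp
        rw [hd]
        simp only [List.length_cons] at h
        rw [ih _ _ (by omega)]
        simp
      · have hpre : List.isPrefixOf [k] (c :: t) = false := by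
          simp only [List.isPrefixOf, Bool.and_eq_false_iff, beq_eq_false_iff_ne, ne_eq]
          exact Or.inl (fun h => hc h.symm)
        rw [PySem.Chars.replace.go, if_neg (by simp [hpre])]
        simp only [List.length_cons] at h
        rw [ih _ _ (by omega)]
        simp [hc]

theorem replace_single (k : Char) (v cs : List Char) :
    PySem.Chars.replace cs [k] v = cs.flatMap (fun c => if c = k then v else [c]) := by
  rw [PySem.Chars.replace]
  simp only [List.isEmpty_cons, if_false, Bool.false_eq_true]
  rw [replace_go_single k v cs.length cs [] (le_refl _)]
  simp

theorem pvSubst_comp (c : Char) :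
    ((if c = ' ' then ['-'] else [c]).flatMap
      (fun x => (if x = '&' then ['%','2','6'] else [x]).flatMap
        (fun y => (if y = '\'' then ([] : List Char) else [y]).flatMap
          (fun z => if z = '#' then ['%','2','3'] else [z])))) = pvSubst c := by
  by_cases h1 : c = ' '
  · subst h1; decide
  · by_cases h2 : c = '&'
    · subst h2; decide
    · by_cases h3 : c = '\''
      · subst h3; decide
      · by_cases h4 : c = '#'
        · subst h4; decide
        · simp [pvSubst, h1, h2, h3, h4]

theorem url_eq (restaurant_name : String) :
    (PySem.Str.replace (PySem.Str.replace (PySem.Str.replace (PySem.Str.replace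
      (PySem.Str.lower restaurant_name) " " "-") "&" "%26") "'" "") "#" "%23").toList
    = (PySem.Str.lower restaurant_name).toList.flatMap pvSubst := by
  simp only [PySem.Str.toList_replace]
  have e1 := replace_single ' ' ['-']
  have e2 := replace_single '&' ['%','2','6']
  have e3 := replace_single '\'' ([] : List Char)
  have e4 := replace_single '#' ['%','2','3']
  show PySem.Chars.replace (PySem.Chars.replace (PySem.Chars.replace (PySem.Chars.replace
      (PySem.Str.lower restaurant_name).toList [' '] ['-']) ['&'] ['%','2','6']) ['\''] []) ['#'] ['%','2','3'] = _
  rw [e1, e2, e3, e4]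
  simp only [List.flatMap_assoc]
  exact List.flatMap_congr (fun c _ => pvSubst_comp c)

theorem startswith_if_eq (L p q : List Char) (h : p = q) :
    (if PySem.Chars.startswith L p = true then true else false) = PySem.Chars.startswith L q := by
  subst h
  simp

-- ===== VERDICT (by name: the statement is the Claim_ definition above) =====
theorem verify_uber_eats_link_spec : Claim_equal_verify_uber_eats_link := by
  intro link restaurant_name _
  unfold Spec_verify_uber_eats_link verify_uber_eats_link verify_uber_eats_link_alt
  simp only [PySem.Str.startswith_eq]
  refine startswith_if_eq _ _ _ ?_
  rw [String.toList_append, url_eq]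
  simp
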